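-- pv_equiv track=rewrite | github.com/mudiman/codingsolutions | python_code/games_check.py | check
-- ===== SOURCE A (Python) =====
-- def check(n, m, games):
--     if m < n // 2:
--         return False
--
--     # Initialize a list of sets to represent connections between players
--     connections = [set() for _ in range(n)]
--
--     for game in games:
--         team_1 = game[:n // 2]
--         team_2 = game[n // 2:]
--
--         # Update connections for team 1 players
--         for player1 in team_1:
--             connections[player1 - 1].update(team_2)
--
--         # Update connections for team 2 players
--         for player2 in team_2:
--             connections[player2 - 1].update(team_1)
--
--     for player_connections in connections:
--         if len(player_connections) != n - 1:
--             return False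
--
--     return True
-- ===== SOURCE B (Python) =====
-- def check(n, m, games):
--     if m < n // 2:
--         return False
--     half = n // 2
--
--     def opponents(p):
--         # distinct opponents of player p, gathered on demand
--         opp = set()
--         for game in games:
--             if p in game[:half]:
--                 opp.update(game[half:])
--             if p in game[half:]:
--                 opp.update(game[:half])
--         return opp
--
--     return all(len(opponents(p)) == n - 1 for p in range(1, n + 1))
-- ===== Notes on version B (the rewrite author's own statement) =====
-- stated objective: alternative
-- what changed: Transposes the loop nesting: instead of one game-driven pass maintaining an array of n adjacency sets indexed by player-1, B answers a per-player query — for each player p in 1..n it scans the games, tests p's membership in each half, and unions the opposite halves into a local set; all() short-circuits on the first failing player, so no player-indexed structure (nor the full pass over all games' team products) is built when an early player already fails.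
-- outside the precondition, e.g. on check(2, 1, [[1, 0]]): A returns True, B returns False
import Mathlib
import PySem

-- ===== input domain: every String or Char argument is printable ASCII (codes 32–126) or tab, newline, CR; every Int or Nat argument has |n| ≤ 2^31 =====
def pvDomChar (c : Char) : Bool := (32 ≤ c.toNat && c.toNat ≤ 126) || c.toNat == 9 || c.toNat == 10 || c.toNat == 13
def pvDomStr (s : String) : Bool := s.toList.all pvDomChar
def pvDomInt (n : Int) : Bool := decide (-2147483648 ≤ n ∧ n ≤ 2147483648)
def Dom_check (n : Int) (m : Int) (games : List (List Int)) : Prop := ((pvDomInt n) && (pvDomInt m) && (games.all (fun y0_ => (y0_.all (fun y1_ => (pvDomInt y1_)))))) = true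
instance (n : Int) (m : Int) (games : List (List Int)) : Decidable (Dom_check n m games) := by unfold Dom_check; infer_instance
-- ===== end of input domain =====

-- B transposes the loop nesting: no player-indexed adjacency array is built; for each player
-- p in 1..n a local opponent set is gathered on demand by scanning the games and testing p's
-- membership in each half (objective: alternative decomposition, similar cost).

-- ===== PORT A =====
-- connections[player - 1].update(team): Python list indexing — a negative index wraps;
-- an out-of-range index is IndexError (excluded by Pre_), there the state is left unchanged.
def updConn (conns : List (PySem.Set Int)) (player : Int) (team : List Int) : List (PySem.Set Int) :=
  let i : Int := player - 1
  let j : Int := if i < 0 then i + conns.length else i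
  if 0 ≤ j ∧ j.toNat < conns.length then
    conns.set j.toNat (PySem.Set.update (conns.getD j.toNat []) team)
  else conns

def check (n : Int) (m : Int) (games : List (List Int)) : Bool :=
  if m < PySem.Int.floordiv n 2 then false
  else
    let conns0 : List (PySem.Set Int) := List.replicate n.toNat PySem.Set.empty
    let conns := games.foldl (fun cs game =>
      let t1 := PySem.List.slice game none (some (PySem.Int.floordiv n 2))
      let t2 := PySem.List.slice game (some (PySem.Int.floordiv n 2)) none
      let cs1 := t1.foldl (fun cs p => updConn cs p t2) cs
      t2.foldl (fun cs p => updConn cs p t1) cs1) conns0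
    conns.all (fun s => PySem.Set.len s == n - 1)

-- ===== PORT B =====
-- opponents(p): one pass over games, membership test of p in each half,
-- union the opposite half into the local set.
def opponentsB (half : Int) (games : List (List Int)) (p : Int) : PySem.Set Int :=
  games.foldl (fun opp game =>
    let opp := if (PySem.List.slice game none (some half)).contains p
               then PySem.Set.update opp (PySem.List.slice game (some half) none) else opp
    if (PySem.List.slice game (some half) none).contains p
    then PySem.Set.update opp (PySem.List.slice game none (some half)) else opp)
    PySem.Set.empty

def check_alt (n : Int) (m : Int) (games : List (List Int)) : Bool :=
  if m < PySem.Int.floordiv n 2 then false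
  else
    let half := PySem.Int.floordiv n 2
    (PySem.List.pyRange 1 (n + 1) 1).all (fun p =>
      PySem.Set.len (opponentsB half games p) == n - 1)

-- ===== PRECONDITION & SPEC =====
-- Pre_ restricts to the function's natural domain: unless the m < n//2 guard already answers,
-- every player named in a game must be a valid player 1..n — on other players A either raises
-- IndexError (player > n or player ≤ -n) or silently wraps via Python's negative indexing
-- (player in 1-n..0), an artefact of the player-1 list indexing.
def Pre_check (n : Int) (m : Int) (games : List (List Int)) : Prop :=
  m < PySem.Int.floordiv n 2 ∨ ∀ g ∈ games, ∀ p ∈ g, 1 ≤ p ∧ p ≤ n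
instance (n : Int) (m : Int) (games : List (List Int)) : Decidable (Pre_check n m games) := by
  unfold Pre_check; infer_instance
def pvWitness_check : Int × Int × List (List Int) := (2, 1, [[1, 2]])
def Spec_check (n : Int) (m : Int) (games : List (List Int)) (out : Bool) : Prop := out = check_alt n m games
instance (n : Int) (m : Int) (games : List (List Int)) (out : Bool) : Decidable (Spec_check n m games out) := by unfold Spec_check; infer_instance

-- ===== CLAIM (what is proved, stated in full; the proofs are below) =====
def Claim_equal_check : Prop := ∀ (n : Int) (m : Int) (games : List (List Int)), Dom_check n m games → Pre_check n m games → Spec_check n m games (check n m games)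

-- ===== LEMMAS AND PROOFS =====

-- The common characterisation both programs compute: q is a recorded opponent of p
-- after processing `games` iff some game pairs them across its two halves.
def Opp (n : Int) (games : List (List Int)) (p q : Int) : Prop :=
  ∃ g ∈ games,
    (p ∈ PySem.List.slice g none (some (PySem.Int.floordiv n 2)) ∧
     q ∈ PySem.List.slice g (some (PySem.Int.floordiv n 2)) none) ∨
    (p ∈ PySem.List.slice g (some (PySem.Int.floordiv n 2)) none ∧
     q ∈ PySem.List.slice g none (some (PySem.Int.floordiv n 2)))

lemma mem_slice {α : Type} {xs : List α} {a b : Option Int} {x : α}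
    (h : x ∈ PySem.List.slice xs a b) : x ∈ xs := by
  unfold PySem.List.slice at h
  exact List.mem_of_mem_drop (List.mem_of_mem_take h)

lemma length_updConn (conns : List (PySem.Set Int)) (p : Int) (u : List Int) :
    (updConn conns p u).length = conns.length := by
  unfold updConn
  dsimp only
  split <;> (split <;> simp)

lemma updConn_getD (conns : List (PySem.Set Int)) (p : Int) (u : List Int) (i : Nat)
    (hp : 1 ≤ p) (hp2 : p ≤ (conns.length : Int)) :
    (updConn conns p u).getD i [] =
      if (i : Int) = p - 1 then PySem.Set.update (conns.getD i []) u else conns.getD i [] := by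
  have h0 : ¬ (p - 1 < 0) := by omega
  have h1 : (0 : Int) ≤ p - 1 ∧ (p - 1).toNat < conns.length := by omega
  have hlt := h1.2
  unfold updConn
  dsimp only
  rw [if_neg h0, if_pos h1]
  by_cases hi : (i : Int) = p - 1
  · have hieq : i = (p - 1).toNat := by omega
    subst hieq
    rw [if_pos hi]
    rw [List.getD_eq_getElem _ [] (by simpa using hlt)]
    simp
  · rw [if_neg hi]
    have hne : (p - 1).toNat ≠ i := by omega
    by_cases hil : i < conns.length
    · rw [List.getD_eq_getElem _ [] (by simpa using hil), List.getD_eq_getElem _ [] hil]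
      simp only [List.getElem_set]
      rw [if_neg hne]
    · rw [List.getD_eq_default _ [] (by simpa using Nat.le_of_not_lt hil),
          List.getD_eq_default _ [] (Nat.le_of_not_lt hil)]

-- One team's update loop of A: membership, length, Nodup.
lemma foldA (u : List Int) (ts : List Int) (conns : List (PySem.Set Int))
    (hts : ∀ p ∈ ts, 1 ≤ p ∧ p ≤ (conns.length : Int)) :
    (ts.foldl (fun cs p => updConn cs p u) conns).length = conns.length ∧
    (∀ (i : Nat) (q : Int),
      q ∈ (ts.foldl (fun cs p => updConn cs p u) conns).getD i [] ↔
        q ∈ conns.getD i [] ∨ ((i : Int) + 1 ∈ ts ∧ q ∈ u)) ∧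
    (∀ i : Nat, (conns.getD i []).Nodup →
      ((ts.foldl (fun cs p => updConn cs p u) conns).getD i []).Nodup) := by
  induction ts generalizing conns with
  | nil => simp
  | cons p ts ih =>
    have hp := hts p List.mem_cons_self
    have hlen := length_updConn conns p u
    have ih' := ih (updConn conns p u) (by
      intro r hr
      have := hts r (List.mem_cons_of_mem p hr)
      omega)
    simp only [List.foldl_cons]
    refine ⟨by omega, ?_, ?_⟩
    · intro i q
      rw [ih'.2.1 i q, updConn_getD conns p u i hp.1 hp.2]
      by_cases hi : (i : Int) = p - 1
      · rw [if_pos hi, PySem.Set.mem_update]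
        have hip : (i : Int) + 1 = p := by omega
        constructor
        · rintro ((h | h) | ⟨h1, h2⟩)
          · exact Or.inl h
          · exact Or.inr ⟨by rw [hip]; exact List.mem_cons_self, h⟩
          · exact Or.inr ⟨List.mem_cons_of_mem p h1, h2⟩
        · rintro (h | ⟨_, h2⟩)
          · exact Or.inl (Or.inl h)
          · exact Or.inl (Or.inr h2)
      · rw [if_neg hi]
        have hip : (i : Int) + 1 ≠ p := by omega
        constructor
        · rintro (h | ⟨h1, h2⟩)
          · exact Or.inl h
          · exact Or.inr ⟨List.mem_cons_of_mem p h1, h2⟩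
        · rintro (h | ⟨h1, h2⟩)
          · exact Or.inl h
          · rcases List.mem_cons.1 h1 with h1 | h1
            · exact absurd h1 hip
            · exact Or.inr ⟨h1, h2⟩
    · intro i hnd
      apply ih'.2.2
      rw [updConn_getD conns p u i hp.1 hp.2]
      split
      · exact PySem.Set.nodup_update _ _ hnd
      · exact hnd

-- A's games loop: connections[i] collects exactly the Opp-partners of player i+1.
lemma foldGamesA (n : Int) (games : List (List Int)) (conns : List (PySem.Set Int))
    (hg : ∀ g ∈ games, ∀ p ∈ g, 1 ≤ p ∧ p ≤ n)
    (hlen : conns.length = n.toNat) :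
    (games.foldl (fun cs game =>
      let t1 := PySem.List.slice game none (some (PySem.Int.floordiv n 2))
      let t2 := PySem.List.slice game (some (PySem.Int.floordiv n 2)) none
      let cs1 := t1.foldl (fun cs p => updConn cs p t2) cs
      t2.foldl (fun cs p => updConn cs p t1) cs1) conns).length = n.toNat ∧
    (∀ (i : Nat) (q : Int),
      q ∈ (games.foldl (fun cs game =>
        let t1 := PySem.List.slice game none (some (PySem.Int.floordiv n 2))
        let t2 := PySem.List.slice game (some (PySem.Int.floordiv n 2)) none
        let cs1 := t1.foldl (fun cs p => updConn cs p t2) cs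
        t2.foldl (fun cs p => updConn cs p t1) cs1) conns).getD i [] ↔
      q ∈ conns.getD i [] ∨ Opp n games ((i : Int) + 1) q) ∧
    (∀ i : Nat, (conns.getD i []).Nodup →
      ((games.foldl (fun cs game =>
        let t1 := PySem.List.slice game none (some (PySem.Int.floordiv n 2))
        let t2 := PySem.List.slice game (some (PySem.Int.floordiv n 2)) none
        let cs1 := t1.foldl (fun cs p => updConn cs p t2) cs
        t2.foldl (fun cs p => updConn cs p t1) cs1) conns).getD i []).Nodup) := by
  induction games generalizing conns with
  | nil =>
    refine ⟨hlen, ?_, fun i h => h⟩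
    intro i q
    simp [Opp]
  | cons g games ih =>
    simp only [List.foldl_cons]
    have hgp : ∀ p ∈ g, 1 ≤ p ∧ p ≤ n := hg g (by simp)
    set t1 := PySem.List.slice g none (some (PySem.Int.floordiv n 2)) with ht1
    set t2 := PySem.List.slice g (some (PySem.Int.floordiv n 2)) none with ht2
    have hb1 : ∀ p ∈ t1, 1 ≤ p ∧ p ≤ (conns.length : Int) := by
      intro p hp; have := hgp p (mem_slice hp); omega
    have h1 := foldA t2 t1 conns hb1
    have hb2 : ∀ p ∈ t2, 1 ≤ p ∧ p ≤ ((t1.foldl (fun cs p => updConn cs p t2) conns).length : Int) := by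
      intro p hp; have := hgp p (mem_slice hp); rw [h1.1]; omega
    have h2 := foldA t1 t2 (t1.foldl (fun cs p => updConn cs p t2) conns) hb2
    have ih' := ih (t2.foldl (fun cs p => updConn cs p t1)
        (t1.foldl (fun cs p => updConn cs p t2) conns))
      (fun g' hg' => hg g' (by simp [hg'])) (by rw [h2.1, h1.1, hlen])
    refine ⟨ih'.1, ?_, ?_⟩
    · intro i q
      rw [ih'.2.1 i q, h2.2.1 i q, h1.2.1 i q]
      unfold Opp
      simp only [List.mem_cons]
      constructor
      · rintro (((h | ⟨ha, hb⟩) | ⟨ha, hb⟩) | ⟨g', hg', hcase⟩)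
        · exact Or.inl h
        · exact Or.inr ⟨g, Or.inl rfl, Or.inl ⟨ha, hb⟩⟩
        · exact Or.inr ⟨g, Or.inl rfl, Or.inr ⟨ha, hb⟩⟩
        · exact Or.inr ⟨g', Or.inr hg', hcase⟩
      · rintro (h | ⟨g', hg', hcase⟩)
        · exact Or.inl (Or.inl (Or.inl h))
        · rcases hg' with rfl | hg'
          · rcases hcase with ⟨ha, hb⟩ | ⟨ha, hb⟩
            · exact Or.inl (Or.inl (Or.inr ⟨ha, hb⟩))
            · exact Or.inl (Or.inr ⟨ha, hb⟩)
          · exact Or.inr ⟨g', hg', hcase⟩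
    · intro i hnd
      exact ih'.2.2 i (h2.2.2 i (h1.2.2 i hnd))

-- B's per-player query: opponentsB gathers exactly the Opp-partners of p, and is Nodup.
lemma foldB (n : Int) (games : List (List Int)) (p : Int) (opp : PySem.Set Int)
    (hnd : opp.Nodup) :
    (∀ q : Int,
      q ∈ games.foldl (fun opp game =>
        let opp := if (PySem.List.slice game none (some (PySem.Int.floordiv n 2))).contains p
                   then PySem.Set.update opp (PySem.List.slice game (some (PySem.Int.floordiv n 2)) none) else opp
        if (PySem.List.slice game (some (PySem.Int.floordiv n 2)) none).contains p
        then PySem.Set.update opp (PySem.List.slice game none (some (PySem.Int.floordiv n 2))) else opp) opp ↔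
      q ∈ opp ∨ Opp n games p q) ∧
    (games.foldl (fun opp game =>
        let opp := if (PySem.List.slice game none (some (PySem.Int.floordiv n 2))).contains p
                   then PySem.Set.update opp (PySem.List.slice game (some (PySem.Int.floordiv n 2)) none) else opp
        if (PySem.List.slice game (some (PySem.Int.floordiv n 2)) none).contains p
        then PySem.Set.update opp (PySem.List.slice game none (some (PySem.Int.floordiv n 2))) else opp) opp).Nodup := by
  induction games generalizing opp with
  | nil =>
    refine ⟨?_, hnd⟩
    intro q
    simp [Opp]
  | cons g games ih =>
    simp only [List.foldl_cons]
    set t1 := PySem.List.slice g none (some (PySem.Int.floordiv n 2)) with ht1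
    set t2 := PySem.List.slice g (some (PySem.Int.floordiv n 2)) none with ht2
    set opp1 := if t1.contains p then PySem.Set.update opp t2 else opp with hopp1
    set opp2 := if t2.contains p then PySem.Set.update opp1 t1 else opp1 with hopp2
    have hnd2 : opp2.Nodup := by
      rw [hopp2, hopp1]
      split <;> split <;>
        first
          | exact PySem.Set.nodup_update _ _ (PySem.Set.nodup_update _ _ hnd)
          | exact PySem.Set.nodup_update _ _ hnd
          | exact hnd
    have hmem2 : ∀ q : Int, q ∈ opp2 ↔ q ∈ opp ∨ (p ∈ t1 ∧ q ∈ t2) ∨ (p ∈ t2 ∧ q ∈ t1) := by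
      intro q
      rw [hopp2, hopp1]
      by_cases h1 : p ∈ t1 <;> by_cases h2 : p ∈ t2 <;>
        simp [h1, h2, PySem.Set.mem_update] <;> tauto
    have ih' := ih opp2 hnd2
    refine ⟨?_, ih'.2⟩
    intro q
    rw [ih'.1 q, hmem2 q]
    unfold Opp
    simp only [List.mem_cons]
    constructor
    · rintro ((h | hc) | ⟨g', hg', hcase⟩)
      · exact Or.inl h
      · exact Or.inr ⟨g, Or.inl rfl, hc⟩
      · exact Or.inr ⟨g', Or.inr hg', hcase⟩
    · rintro (h | ⟨g', hg', hcase⟩)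
      · exact Or.inl (Or.inl h)
      · rcases hg' with rfl | hg'
        · exact Or.inl (Or.inr hcase)
        · exact Or.inr ⟨g', hg', hcase⟩

lemma check_eq_check_alt (n m : Int) (games : List (List Int))
    (hguard : ¬ m < PySem.Int.floordiv n 2)
    (hg : ∀ g ∈ games, ∀ p ∈ g, 1 ≤ p ∧ p ≤ n) :
    check n m games = check_alt n m games := by
  unfold check check_alt opponentsB
  simp only [if_neg hguard]
  have hA := foldGamesA n games (List.replicate n.toNat PySem.Set.empty) hg (by simp)
  set cs := games.foldl (fun cs game =>
      let t1 := PySem.List.slice game none (some (PySem.Int.floordiv n 2))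
      let t2 := PySem.List.slice game (some (PySem.Int.floordiv n 2)) none
      let cs1 := t1.foldl (fun cs p => updConn cs p t2) cs
      t2.foldl (fun cs p => updConn cs p t1) cs1) (List.replicate n.toNat PySem.Set.empty) with hcs
  obtain ⟨hlen, hmemA, hndA⟩ := hA
  have hempty_getD : ∀ i : Nat, (List.replicate n.toNat (PySem.Set.empty : PySem.Set Int)).getD i [] = [] := by
    intro i
    rcases Nat.lt_or_ge i n.toNat with hi | hi
    · simp [List.getD, hi, PySem.Set.empty]
    · simp [List.getD]
  -- same membership + Nodup on both sides ⇒ same length for every player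
  have hsame : ∀ i : Nat, i < n.toNat →
      PySem.Set.len (cs.getD i []) =
      PySem.Set.len (games.foldl (fun opp game =>
        let opp := if (PySem.List.slice game none (some (PySem.Int.floordiv n 2))).contains ((i : Int) + 1)
                   then PySem.Set.update opp (PySem.List.slice game (some (PySem.Int.floordiv n 2)) none) else opp
        if (PySem.List.slice game (some (PySem.Int.floordiv n 2)) none).contains ((i : Int) + 1)
        then PySem.Set.update opp (PySem.List.slice game none (some (PySem.Int.floordiv n 2))) else opp)
        PySem.Set.empty) := by
    intro i _
    have hB := foldB n games ((i : Int) + 1) PySem.Set.empty (by simp [PySem.Set.empty])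
    have hndcs : (cs.getD i []).Nodup := by
      apply hndA i
      rw [hempty_getD i]
      simp
    have hmem : ∀ q : Int, q ∈ cs.getD i [] ↔
        q ∈ games.foldl (fun opp game =>
          let opp := if (PySem.List.slice game none (some (PySem.Int.floordiv n 2))).contains ((i : Int) + 1)
                     then PySem.Set.update opp (PySem.List.slice game (some (PySem.Int.floordiv n 2)) none) else opp
          if (PySem.List.slice game (some (PySem.Int.floordiv n 2)) none).contains ((i : Int) + 1)
          then PySem.Set.update opp (PySem.List.slice game none (some (PySem.Int.floordiv n 2))) else opp)
          PySem.Set.empty := by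
      intro q
      rw [hmemA i q, hB.1 q, hempty_getD i]
      simp [PySem.Set.empty]
    have hperm : (cs.getD i []).Perm _ :=
      (List.perm_ext_iff_of_nodup hndcs hB.2).2 hmem
    unfold PySem.Set.len
    rw [hperm.length_eq]
  rw [Bool.eq_iff_iff]
  simp only [List.all_eq_true, beq_iff_eq]
  constructor
  · intro hAll p hpmem
    rw [PySem.List.mem_pyRange_one] at hpmem
    have hi : (p - 1).toNat < n.toNat := by omega
    have hip : ((((p - 1).toNat : Nat) : Int) + 1) = p := by omega
    have := hsame (p - 1).toNat hi
    rw [hip] at this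
    rw [← this]
    have hplt : (p - 1).toNat < cs.length := by omega
    exact hAll (cs.getD (p - 1).toNat []) (by
      rw [List.getD_eq_getElem cs [] hplt]
      exact List.getElem_mem hplt)
  · intro hAll s hs
    obtain ⟨i, hi, rfl⟩ := List.mem_iff_getElem.1 hs
    have hin : i < n.toNat := by omega
    have hp : ((i : Int) + 1) ∈ PySem.List.pyRange 1 (n + 1) 1 :=
      PySem.List.mem_pyRange_one.2 ⟨by omega, by omega⟩
    have := hAll ((i : Int) + 1) hp
    rw [← hsame i hin] at this
    rw [List.getD_eq_getElem cs [] hi] at this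
    exact this

-- ===== VERDICT (by name: the statement is the Claim_ definition above) =====
theorem check_spec : Claim_equal_check := by
  intro n m games _ hpre
  unfold Spec_check
  rcases hpre with hpre | hpre
  · unfold check check_alt
    simp only [if_pos hpre]
  · by_cases hguard : m < PySem.Int.floordiv n 2
    · unfold check check_alt
      simp only [if_pos hguard]
    · exact check_eq_check_alt n m games hguard hpre
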